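-- pv_equiv track=rewrite | github.com/4rchitect/psvtrophyisgood | ParseTRPTRNS.py | findDataZone
-- ===== SOURCE A (Python) =====
-- def findDataZone(v):
--         begin = 0x367
--         end = begin + 0xAC
--         a = 0
--         while a != v:
--             begin += 0xb0
--             end = begin + 0xAC
--             a += 1
--         return {"begin":begin,"end":end}
-- ===== SOURCE B (Python) =====
-- def findDataZone(v):
--     begin = 0x367 + v * 0xb0
--     return {"begin": begin, "end": begin + 0xAC}
-- ===== Notes on version B (the rewrite author's own statement) =====
-- stated objective: faster
-- what changed: Replaced the O(v) counting loop with the closed-form begin = 0x367 + v*0xb0, end = begin + 0xAC.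
-- outside the precondition, e.g. on findDataZone(-1): A does not finish within the time limit, B returns {'begin': 695, 'end': 867}
import Mathlib
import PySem

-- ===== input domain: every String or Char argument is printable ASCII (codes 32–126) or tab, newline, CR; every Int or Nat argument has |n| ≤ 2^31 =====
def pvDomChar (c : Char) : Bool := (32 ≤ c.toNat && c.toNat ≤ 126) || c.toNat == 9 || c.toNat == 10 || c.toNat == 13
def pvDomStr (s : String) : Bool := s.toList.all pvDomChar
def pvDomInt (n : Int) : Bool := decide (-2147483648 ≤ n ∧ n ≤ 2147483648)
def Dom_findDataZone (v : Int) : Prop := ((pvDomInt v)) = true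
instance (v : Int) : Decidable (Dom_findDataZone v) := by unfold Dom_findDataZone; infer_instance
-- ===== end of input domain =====

-- B replaces A's O(v) counting while-loop with the closed-form begin = 0x367 + v*0xb0 (faster).
-- ===== PORT A =====
-- literal port of A's while-loop: fuel = v.toNat (the loop runs exactly v times for v ≥ 0;
-- for v < 0 Python diverges, which Pre_ excludes)
def fdLoopA (v begin e a : Int) : Nat → Int × Int
  | 0 => (begin, e)
  | Nat.succ f =>
    if a ≠ v then fdLoopA v (begin + 0xb0) (begin + 0xb0 + 0xAC) (a + 1) f
    else (begin, e)

def findDataZone (v : Int) : List (String × Int) :=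
  let begin := (0x367 : Int)
  let e := begin + 0xAC
  let r := if (0 : Int) ≠ v then fdLoopA v begin e 0 v.toNat else (begin, e)
  [("begin", r.1), ("end", r.2)]

-- ===== PORT B =====
def findDataZone_alt (v : Int) : List (String × Int) :=
  let begin := 0x367 + v * 0xb0
  [("begin", begin), ("end", begin + 0xAC)]

-- ===== PRECONDITION & SPEC =====
-- Pre_ excludes v < 0, on which A's while-loop never terminates (a counts up from 0 and never equals v)
def Pre_findDataZone (v : Int) : Prop := 0 ≤ v
instance (v : Int) : Decidable (Pre_findDataZone v) := by unfold Pre_findDataZone; infer_instance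
def pvWitness_findDataZone : Int := 3

def Spec_findDataZone (v : Int) (out : List (String × Int)) : Prop := out = findDataZone_alt v
instance (v : Int) (out : List (String × Int)) : Decidable (Spec_findDataZone v out) := by unfold Spec_findDataZone; infer_instance

-- ===== CLAIM (what is proved, stated in full; the proofs are below) =====
def Claim_equal_findDataZone : Prop := ∀ (v : Int), Dom_findDataZone v → Pre_findDataZone v → Spec_findDataZone v (findDataZone v)

-- ===== LEMMAS AND PROOFS =====

-- ===== VERDICT (by name: the statement is the Claim_ definition above) =====
lemma fdLoopA_closed (v : Int) (n : Nat) : ∀ (a begin : Int), a + n = v →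
    fdLoopA v begin (begin + 0xAC) a n = (begin + n * 0xb0, begin + n * 0xb0 + 0xAC) := by
  induction n with
  | zero => intro a begin h; simp [fdLoopA]
  | succ f ih =>
    intro a begin h
    have hne : a ≠ v := by omega
    have hb : fdLoopA v (begin + 0xb0) (begin + 0xb0 + 0xAC) (a + 1) f
        = (begin + 0xb0 + f * 0xb0, begin + 0xb0 + f * 0xb0 + 0xAC) :=
      ih (a + 1) (begin + 0xb0) (by push_cast at h ⊢; omega)
    simp [fdLoopA, hne, hb]
    ring

theorem findDataZone_spec : Claim_equal_findDataZone := by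
  unfold Claim_equal_findDataZone Spec_findDataZone Pre_findDataZone
  intro v _ hv
  unfold findDataZone findDataZone_alt
  rcases eq_or_lt_of_le hv with h0 | h0
  · simp [← h0]
  · have hne : (0 : Int) ≠ v := by omega
    have hvn : (v.toNat : Int) = v := Int.toNat_of_nonneg hv
    have h := fdLoopA_closed v v.toNat 0 0x367 (by omega)
    rw [hvn] at h
    norm_num at h
    simp [hne, h]
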